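-- pv_equiv track=rewrite | github.com/devlarabar/advent-of-code | 2023/09-mirage-maintenance-2.py | predict_prev_values
-- ===== SOURCE A (Python) =====
-- def predict_prev_values(diffs):
--     predictions = []
--     for all_diffs in diffs:
--         i = len(all_diffs) - 1
--         prediction = 0
--         while i > 0:
--             prediction = all_diffs[i-1][0] - prediction
--             i -= 1
--         predictions.append(prediction)
--     return predictions
-- ===== SOURCE B (Python) =====
-- def predict_prev_values(diffs):
--     return [sum((-1) ** j * all_diffs[j][0] for j in range(len(all_diffs) - 1))
--             for all_diffs in diffs]
-- ===== Notes on version B (the rewrite author's own statement) =====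
-- stated objective: alternative
-- what changed: Replaces the backward subtract-from-accumulator while-loop with a direct closed-form alternating sum of the first elements of the levels, summed forward.
import Mathlib
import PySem

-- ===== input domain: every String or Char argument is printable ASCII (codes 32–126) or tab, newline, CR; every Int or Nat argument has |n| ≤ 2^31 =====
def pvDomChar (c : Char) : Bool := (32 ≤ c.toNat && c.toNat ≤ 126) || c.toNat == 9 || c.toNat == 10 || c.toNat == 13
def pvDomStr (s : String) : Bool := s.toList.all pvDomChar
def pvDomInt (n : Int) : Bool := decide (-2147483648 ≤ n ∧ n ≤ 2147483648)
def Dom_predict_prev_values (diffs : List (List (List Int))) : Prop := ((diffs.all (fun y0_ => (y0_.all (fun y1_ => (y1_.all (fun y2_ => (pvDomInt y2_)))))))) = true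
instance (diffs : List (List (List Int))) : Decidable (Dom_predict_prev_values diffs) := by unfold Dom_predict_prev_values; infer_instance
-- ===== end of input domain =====

-- ===== PORT A =====
-- B computes each prediction as a closed-form alternating sum instead of A's backward
-- subtract-from-accumulator loop; objective: alternative (same cost, different decomposition).

-- while i > 0: prediction = all_diffs[i-1][0] - prediction; i -= 1
-- (index access via pyGet?/getD; exact under Pre_, where all accessed lists are nonempty)
def pvLoopA (seq : List (List Int)) : Nat → Int → Int
  | 0, p => p
  | Nat.succ k, p => pvLoopA seq k ((PySem.List.pyGet? ((PySem.List.pyGet? seq (Int.ofNat k)).getD []) 0).getD 0 - p)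

def predict_prev_values (diffs : List (List (List Int))) : List Int :=
  diffs.foldl (fun predictions all_diffs =>
    predictions ++ [pvLoopA all_diffs (all_diffs.length - 1) 0]) []

-- ===== PORT B =====
def predict_prev_values_alt (diffs : List (List (List Int))) : List Int :=
  diffs.map (fun all_diffs =>
    (List.range (all_diffs.length - 1)).foldl
      (fun s j => s + (-1 : Int) ^ j * (PySem.List.pyGet? ((PySem.List.pyGet? all_diffs (Int.ofNat j)).getD []) 0).getD 0) 0)

-- ===== PRECONDITION & SPEC =====
-- Pre_ excludes inputs on which Python A raises IndexError: a sequence with an empty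
-- level among all but its last (A reads level[0] there); B raises there too.
def Pre_predict_prev_values (diffs : List (List (List Int))) : Prop :=
  ∀ s ∈ diffs, ∀ t ∈ s.dropLast, t ≠ []
instance (diffs : List (List (List Int))) : Decidable (Pre_predict_prev_values diffs) := by unfold Pre_predict_prev_values; infer_instance
def pvWitness_predict_prev_values : List (List (List Int)) := [[[0, 3], [3, 3], [0]], [[5]], []]
def Spec_predict_prev_values (diffs : List (List (List Int))) (out : List Int) : Prop := out = predict_prev_values_alt diffs
instance (diffs : List (List (List Int))) (out : List Int) : Decidable (Spec_predict_prev_values diffs out) := by unfold Spec_predict_prev_values; infer_instance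


-- ===== CLAIM (what is proved, stated in full; the proofs are below) =====
def Claim_equal_predict_prev_values : Prop := ∀ (diffs : List (List (List Int))), Dom_predict_prev_values diffs → Pre_predict_prev_values diffs → Spec_predict_prev_values diffs (predict_prev_values diffs)

-- ===== LEMMAS AND PROOFS =====

theorem pvLoopA_eq (seq : List (List Int)) (k : Nat) (p : Int) :
    pvLoopA seq k p =
      (List.range k).foldl
        (fun s j => s + (-1 : Int) ^ j * (PySem.List.pyGet? ((PySem.List.pyGet? seq (Int.ofNat j)).getD []) 0).getD 0) 0
      + (-1 : Int) ^ k * p := by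
  induction k generalizing p with
  | zero => simp [pvLoopA]
  | succ n ih =>
    simp only [pvLoopA, ih, List.range_succ, List.foldl_append, List.foldl_cons, List.foldl_nil]
    ring

-- ===== VERDICT (by name: the statement is the Claim_ definition above) =====
theorem pvFlattenSingleton {α β : Type} (f : α → β) (l : List α) :
    (l.map (fun a => [f a])).flatten = l.map f := by
  induction l with
  | nil => rfl
  | cons a t ih => simp [ih]

theorem predict_prev_values_total (diffs : List (List (List Int))) :
    predict_prev_values diffs = predict_prev_values_alt diffs := by
  unfold predict_prev_values predict_prev_values_alt
  induction diffs using List.reverseRecOn with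
  | nil => rfl
  | append_singleton xs x _ =>
    simp only [List.foldl_append, List.foldl_cons, List.foldl_nil, List.map_append,
      List.map_cons, List.map_nil, pvLoopA_eq]
    simp [pvFlattenSingleton]

theorem predict_prev_values_spec : Claim_equal_predict_prev_values :=
  fun diffs _ _ => predict_prev_values_total diffs
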